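-- pv_equiv track=rewrite | github.com/PawelDabala/KATA | exerciser34.py | relatively_prime
-- ===== SOURCE A (Python) =====
-- def relatively_prime (n,l):
--     primes = []
--     final_primes = []
--
--     for num in range(1, n):
--         if num > 1:
--             for i in range(2, num):
--                 if (num % i) == 0:
--                     break
--             else:
--                 primes.append(num)
--
--     for i in l:
--         is_prime = True
--         for j in primes:
--             if i % j == 0:
--                 is_prime =False
--         if is_prime:
--             final_primes.append(i)
--
--     return  final_primes
-- ===== SOURCE B (Python) =====
-- def relatively_prime(n, l):
--     # An integer is divisible by some prime below n iff it is divisible by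
--     # some integer in [2, n), so no prime list is needed at all.
--     return [i for i in l if all(i % m for m in range(2, n))]
-- ===== Notes on version B (the rewrite author's own statement) =====
-- stated objective: simpler
-- what changed: B drops A's quadratic trial-division prime generation entirely and keeps an element iff no integer in [2,n) divides it (equivalent because every divisor >= 2 has a prime factor below it), as a single comprehension.
import Mathlib
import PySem

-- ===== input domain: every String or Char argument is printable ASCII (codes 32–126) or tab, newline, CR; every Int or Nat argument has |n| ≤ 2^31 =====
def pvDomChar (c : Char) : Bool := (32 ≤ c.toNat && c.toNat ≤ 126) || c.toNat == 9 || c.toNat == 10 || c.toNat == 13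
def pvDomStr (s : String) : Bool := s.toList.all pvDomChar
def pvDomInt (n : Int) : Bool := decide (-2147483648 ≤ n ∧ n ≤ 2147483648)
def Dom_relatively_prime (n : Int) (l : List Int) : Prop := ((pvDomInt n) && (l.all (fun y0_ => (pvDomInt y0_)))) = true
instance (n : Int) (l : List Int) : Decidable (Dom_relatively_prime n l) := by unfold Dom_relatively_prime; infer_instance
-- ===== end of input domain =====

-- B keeps an element iff no integer in [2, n) divides it, with no prime
-- generation at all (equivalent: every divisor ≥ 2 has a prime factor below it);
-- objective: simpler (a single filter instead of trial-division prime list + two loops).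

-- ===== PORT A =====
def relatively_prime (n : Int) (l : List Int) : List Int :=
  -- first loop: build `primes` by trial division (for-else with break = `any`)
  let primes : List Int :=
    (PySem.List.pyRange 1 n 1).foldl (fun primes num =>
      if 1 < num then
        if (PySem.List.pyRange 2 num 1).any (fun i => PySem.Int.mod num i == 0) then
          primes
        else primes ++ [num]
      else primes) []
  -- second loop: flag `is_prime` swept over all primes (no break), then append
  l.foldl (fun final_primes i =>
    let is_prime :=
      primes.foldl (fun is_prime j =>
        if PySem.Int.mod i j == 0 then false else is_prime) true
    if is_prime then final_primes ++ [i] else final_primes) []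

-- ===== PORT B =====
def relatively_prime_alt (n : Int) (l : List Int) : List Int :=
  l.filter (fun i => (PySem.List.pyRange 2 n 1).all (fun m => PySem.Int.mod i m != 0))

-- ===== PRECONDITION & SPEC =====
def Spec_relatively_prime (n : Int) (l : List Int) (out : List Int) : Prop := out = relatively_prime_alt n l
instance (n : Int) (l : List Int) (out : List Int) : Decidable (Spec_relatively_prime n l out) := by unfold Spec_relatively_prime; infer_instance

-- ===== CLAIM (what is proved, stated in full; the proofs are below) =====
def Claim_equal_relatively_prime : Prop := ∀ (n : Int) (l : List Int), Dom_relatively_prime n l → Spec_relatively_prime n l (relatively_prime n l)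

-- ===== LEMMAS AND PROOFS =====

-- the Boolean test A's first loop applies to each candidate
def pvGoodA (num : Int) : Bool :=
  decide (1 < num) && !((PySem.List.pyRange 2 num 1).any (fun i => PySem.Int.mod num i == 0))

-- A's first loop is a filter by pvGoodA
theorem primesA_eq_filter (n : Int) :
    (PySem.List.pyRange 1 n 1).foldl (fun primes num =>
      if 1 < num then
        if (PySem.List.pyRange 2 num 1).any (fun i => PySem.Int.mod num i == 0) then
          primes
        else primes ++ [num]
      else primes) []
    = (PySem.List.pyRange 1 n 1).filter pvGoodA := by
  have h := PySem.List.foldl_append_if_eq_filter (l := PySem.List.pyRange 1 n 1)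
      (p := pvGoodA) (acc := ([] : List Int))
  rw [List.nil_append] at h
  rw [← h]
  apply PySem.List.foldl_congr_mem
  intro acc x _
  by_cases h1 : (1 : Int) < x
  · by_cases h2 : (PySem.List.pyRange 2 x 1).any (fun i => PySem.Int.mod x i == 0) = true <;>
      simp [pvGoodA, h1, h2]
  · simp [pvGoodA, h1]

-- the `is_prime` flag loop computes `all (not divisible)`
theorem flag_loop_eq_all (i : Int) (ps : List Int) (b : Bool) :
    ps.foldl (fun is_prime j =>
        if PySem.Int.mod i j == 0 then false else is_prime) b
    = (b && ps.all (fun j => !(PySem.Int.mod i j == 0))) := by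
  induction ps generalizing b with
  | nil => simp
  | cons p ps ih =>
    simp only [List.foldl_cons, ih, List.all_cons]
    by_cases h : (PySem.Int.mod i p == 0) = true <;> simp [h]

-- divisibility by some member of A's prime list ↔ by some integer in [2, n)
theorem key_iff (n i : Int) :
    (∀ j ∈ (PySem.List.pyRange 1 n 1).filter pvGoodA, ¬ j ∣ i)
    ↔ (∀ m ∈ PySem.List.pyRange 2 n 1, ¬ m ∣ i) := by
  constructor
  · intro h m hm hdvd
    rw [PySem.List.mem_pyRange_one] at hm
    -- take a prime factor p of m; it lies in A's prime list
    have hmn : ((m.toNat : Int)) = m := Int.toNat_of_nonneg (by omega)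
    have hne1 : m.toNat ≠ 1 := by omega
    obtain ⟨p, hp, hpd⟩ := Nat.exists_prime_and_dvd hne1
    have hple : p ≤ m.toNat := Nat.le_of_dvd (by omega) hpd
    have hp2 : 2 ≤ p := hp.two_le
    have hpmem : (p : Int) ∈ (PySem.List.pyRange 1 n 1).filter pvGoodA := by
      rw [List.mem_filter, PySem.List.mem_pyRange_one]
      refine ⟨⟨by exact_mod_cast Nat.one_le_of_lt hp2, by omega⟩, ?_⟩
      simp only [pvGoodA, Bool.and_eq_true, decide_eq_true_eq, Bool.not_eq_true',
        Bool.eq_false_iff, ne_eq, List.any_eq_true, not_exists, not_and]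
      refine ⟨by exact_mod_cast hp2, ?_⟩
      intro d hd hdp
      rw [PySem.List.mem_pyRange_one] at hd
      rw [beq_iff_eq, PySem.Int.mod_eq_zero_iff_dvd] at hdp
      have hdn : ((d.toNat : Int)) = d := Int.toNat_of_nonneg (by omega)
      have : d.toNat ∣ p := by
        have := hdp
        rw [← hdn] at this
        exact_mod_cast this
      rcases hp.eq_one_or_self_of_dvd d.toNat this with h1 | h1 <;> omega
    have hpi : (p : Int) ∣ i := by
      refine dvd_trans ?_ hdvd
      rw [← hmn]
      exact_mod_cast hpd
    exact h _ hpmem hpi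
  · intro h j hj hdvd
    rw [List.mem_filter, PySem.List.mem_pyRange_one] at hj
    obtain ⟨⟨_, hjn⟩, hgood⟩ := hj
    have hj1 : 1 < j := by
      simp only [pvGoodA, Bool.and_eq_true, decide_eq_true_eq] at hgood
      exact hgood.1
    exact h j (by rw [PySem.List.mem_pyRange_one]; omega) hdvd

-- the two element tests agree
theorem pred_eq (n i : Int) :
    ((PySem.List.pyRange 1 n 1).filter pvGoodA).all (fun j => !(PySem.Int.mod i j == 0))
    = (PySem.List.pyRange 2 n 1).all (fun m => PySem.Int.mod i m != 0) := by
  rw [Bool.eq_iff_iff]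
  simp only [List.all_eq_true, bne_iff_ne, ne_eq, Bool.not_eq_true', Bool.eq_false_iff,
    beq_iff_eq, PySem.Int.mod_eq_zero_iff_dvd]
  exact key_iff n i

-- ===== VERDICT (by name: the statement is the Claim_ definition above) =====
theorem relatively_prime_spec : Claim_equal_relatively_prime := by
  intro n l _
  unfold Spec_relatively_prime relatively_prime relatively_prime_alt
  rw [primesA_eq_filter]
  simp only [flag_loop_eq_all, Bool.true_and, pred_eq]
  rw [PySem.List.foldl_append_if_eq_filter]
  simp
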